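-- pv_equiv track=rewrite | github.com/aimhigh53/AlgoWing | JeongHyeon/SWEA/Advanced/03_탐욕 알고리즘/03_베이비진 게임.py | run_check
-- ===== SOURCE A (Python) =====
-- def run_check(list):
--     temp = 0
--     for i in list:
--         if i != 0:
--             temp += 1
--             if temp >= 3:
--                 return True
--         else: # 초기화
--             temp = 0
--     return False
-- ===== SOURCE B (Python) =====
-- def run_check(list):
--     # idiomatic windowed scan: any three consecutive non-zero elements
--     return any(a != 0 and b != 0 and c != 0
--                for a, b, c in zip(list, list[1:], list[2:]))
-- ===== Notes on version B (the rewrite author's own statement) =====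
-- stated objective: idiomatic
-- what changed: Replaces the stateful run-length counter with a single idiomatic any() over the length-3 sliding windows zip(list, list[1:], list[2:]).
import Mathlib
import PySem

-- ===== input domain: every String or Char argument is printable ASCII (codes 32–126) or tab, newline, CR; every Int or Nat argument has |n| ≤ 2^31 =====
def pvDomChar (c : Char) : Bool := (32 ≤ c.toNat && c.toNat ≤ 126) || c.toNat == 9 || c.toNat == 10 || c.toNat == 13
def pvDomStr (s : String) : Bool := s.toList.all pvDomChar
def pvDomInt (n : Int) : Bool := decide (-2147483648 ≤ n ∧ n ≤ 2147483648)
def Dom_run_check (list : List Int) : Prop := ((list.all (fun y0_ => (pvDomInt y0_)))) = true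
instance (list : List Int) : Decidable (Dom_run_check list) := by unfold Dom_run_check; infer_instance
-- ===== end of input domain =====

-- ===== PORT A =====
-- A-side helper: the for-loop with early return and counter `temp`
def runCheckGo : List Int → Int → Bool
  | [], _ => false
  | i :: rest, temp =>
    if i ≠ 0 then
      if temp + 1 ≥ 3 then true else runCheckGo rest (temp + 1)
    else runCheckGo rest 0

def run_check (list : List Int) : Bool :=
  runCheckGo list 0


-- ===== PORT B =====
-- list[1:], list[2:] are List.drop 1 / List.drop 2 (exact: nonnegative slice starts)
def run_check_alt (list : List Int) : Bool :=
  (list.zip ((list.drop 1).zip (list.drop 2))).any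
    (fun x => decide (x.1 ≠ 0) && decide (x.2.1 ≠ 0) && decide (x.2.2 ≠ 0))


-- ===== PRECONDITION & SPEC =====
def Spec_run_check (list : List Int) (out : Bool) : Prop := out = run_check_alt list
instance (list : List Int) (out : Bool) : Decidable (Spec_run_check list out) := by unfold Spec_run_check; infer_instance

-- ===== CLAIM (what is proved, stated in full; the proofs are below) =====
def Claim_equal_run_check : Prop := ∀ (list : List Int), Dom_run_check list → Spec_run_check list (run_check list)

-- ===== LEMMAS AND PROOFS =====


theorem go_step (a : Int) (r : List Int) (t : Int) :
    runCheckGo (a :: r) t =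
      if a ≠ 0 then (if t + 1 ≥ 3 then true else runCheckGo r (t + 1)) else runCheckGo r 0 := rfl

theorem alt_cons3 (a b c : Int) (r : List Int) :
    run_check_alt (a :: b :: c :: r) =
      ((decide (a ≠ 0) && decide (b ≠ 0) && decide (c ≠ 0)) || run_check_alt (b :: c :: r)) := by
  simp [run_check_alt]

theorem alt_cons_zero (r : List Int) : run_check_alt (0 :: r) = run_check_alt r := by
  match r with
  | [] => simp [run_check_alt]
  | [b] => simp [run_check_alt]
  | b :: c :: r' => rw [alt_cons3]; simp

theorem alt_cons_one (a : Int) (ha : a ≠ 0) (r : List Int) :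
    run_check_alt (a :: r) = run_check_alt (1 :: r) := by
  match r with
  | [] => simp [run_check_alt]
  | [b] => simp [run_check_alt]
  | b :: c :: r' => rw [alt_cons3, alt_cons3]; simp [ha]

theorem alt_cons_cons (a b : Int) (ha : a ≠ 0) (hb : b ≠ 0) (r : List Int) :
    run_check_alt (a :: b :: r) = run_check_alt (1 :: 1 :: r) := by
  match r with
  | [] => simp [run_check_alt]
  | c :: r' =>
    rw [alt_cons3, alt_cons3, alt_cons_one b hb]
    simp [ha, hb]

theorem alt_one_zero (r : List Int) : run_check_alt (1 :: 0 :: r) = run_check_alt r := by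
  match r with
  | [] => simp [run_check_alt]
  | c :: r' => rw [alt_cons3, alt_cons_zero]; simp

theorem go_eq_alt (l : List Int) :
    runCheckGo l 0 = run_check_alt l ∧
    runCheckGo l 1 = run_check_alt (1 :: l) ∧
    runCheckGo l 2 = run_check_alt (1 :: 1 :: l) := by
  induction l with
  | nil => simp [runCheckGo, run_check_alt]
  | cons a r ih =>
    obtain ⟨h0, h1, h2⟩ := ih
    by_cases ha : a = 0
    · subst ha
      refine ⟨?_, ?_, ?_⟩
      · rw [go_step, alt_cons_zero]; simpa using h0
      · rw [go_step, alt_one_zero]; simpa using h0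
      · rw [go_step, alt_cons3, alt_one_zero]; simpa using h0
    · refine ⟨?_, ?_, ?_⟩
      · rw [go_step, alt_cons_one a ha]
        simpa [ha] using h1
      · rw [go_step, alt_cons_cons 1 a one_ne_zero ha]
        simpa [ha] using h2
      · rw [go_step, alt_cons3]
        simp [ha]

-- ===== VERDICT (by name: the statement is the Claim_ definition above) =====
theorem run_check_spec : Claim_equal_run_check := by
  intro l _
  unfold Spec_run_check run_check
  exact (go_eq_alt l).1
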